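-- pv_equiv track=rewrite | github.com/jacobemerick/health-sync | health_ingest/handler.py | dedup_workouts
-- ===== SOURCE A (Python) =====
-- def dedup_workouts(workouts):
--     """
--     Dedup workouts by exact start timestamp.
--     When duplicates share a start time, prefer the one with a 'distance' field.
--     """
--     by_start = {}
--     for w in workouts:
--         start = w.get("start", "")
--         if start not in by_start:
--             by_start[start] = w
--         else:
--             existing = by_start[start]
--             # Prefer workout that has distance
--             existing_has_dist = existing.get("distance") is not None
--             new_has_dist = w.get("distance") is not None
--             if new_has_dist and not existing_has_dist:
--                 by_start[start] = w
--             # If both or neither have distance, keep existing (first seen)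
--     return list(by_start.values())
-- ===== SOURCE B (Python) =====
-- def dedup_workouts(workouts):
--     """Group workouts by start time, then pick first-with-distance (else first) per group."""
--     groups = {}
--     for w in workouts:
--         groups.setdefault(w.get("start", ""), []).append(w)
--     return [next((w for w in g if w.get("distance") is not None), g[0])
--             for g in groups.values()]
-- ===== Notes on version B (the rewrite author's own statement) =====
-- stated objective: alternative
-- what changed: A streams once over the workouts, keeping or replacing the dict entry per start key as it goes; B makes two separate passes: first group all workouts by start key into lists (first-seen key order), then select from each group the first workout with a non-null distance, else the group's first.
import Mathlib
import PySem

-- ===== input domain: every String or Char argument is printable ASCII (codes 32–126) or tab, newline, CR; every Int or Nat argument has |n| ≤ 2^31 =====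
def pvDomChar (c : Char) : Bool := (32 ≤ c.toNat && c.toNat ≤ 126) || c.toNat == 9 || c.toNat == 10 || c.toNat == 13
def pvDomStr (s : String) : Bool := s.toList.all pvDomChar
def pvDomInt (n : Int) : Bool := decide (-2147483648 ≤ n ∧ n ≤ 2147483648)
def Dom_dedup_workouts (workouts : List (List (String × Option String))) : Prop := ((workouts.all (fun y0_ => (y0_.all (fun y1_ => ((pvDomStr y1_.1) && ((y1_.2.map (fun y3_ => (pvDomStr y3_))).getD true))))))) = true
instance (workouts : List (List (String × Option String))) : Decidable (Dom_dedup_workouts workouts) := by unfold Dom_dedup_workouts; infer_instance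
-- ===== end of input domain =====

-- B replaces A's streaming keep-or-replace dict update with two passes (group by start,
-- then select first-with-distance else first per group); objective: alternative decomposition.

-- ===== PORT A =====
-- w.get("start", "") : the value type is Option String (Python None ↦ none), so the
-- default "" is the value `some ""`; w.get("distance") has default None ↦ `none`.
def pvKey (w : List (String × Option String)) : Option String :=
  (PySem.Dict.mk w).getD "start" (some "")

def pvHasDist (w : List (String × Option String)) : Bool :=
  ((PySem.Dict.mk w).getD "distance" none).isSome

def dedup_workouts (workouts : List (List (String × Option String))) : List (List (String × Option String)) :=
  (workouts.foldl (fun by_start w =>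
      let start := pvKey w
      if !(by_start.contains start) then
        by_start.insert start w
      else
        let existing := by_start.getD start []
        let existing_has_dist := pvHasDist existing
        let new_has_dist := pvHasDist w
        if new_has_dist && !existing_has_dist then by_start.insert start w else by_start)
    PySem.Dict.empty).values

-- ===== PORT B =====
-- groups.setdefault(start, []).append(w)  =  modify start [] (· ++ [w])
-- next((w for w in g if w.get("distance") is not None), g[0]); groups are built nonempty,
-- so the `.headD []` default of g[0] is never reached.
def pvPick (g : List (List (String × Option String))) : List (String × Option String) :=
  match g.find? pvHasDist with
  | some w => w
  | none => g.headD []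

def dedup_workouts_alt (workouts : List (List (String × Option String))) : List (List (String × Option String)) :=
  ((workouts.foldl (fun groups w => groups.modify (pvKey w) [] (· ++ [w]))
      PySem.Dict.empty).values).map pvPick

-- ===== PRECONDITION & SPEC =====
def Spec_dedup_workouts (workouts : List (List (String × Option String))) (out : List (List (String × Option String))) : Prop := out = dedup_workouts_alt workouts
instance (workouts : List (List (String × Option String))) (out : List (List (String × Option String))) : Decidable (Spec_dedup_workouts workouts out) := by unfold Spec_dedup_workouts; infer_instance

-- ===== CLAIM (what is proved, stated in full; the proofs are below) =====
def Claim_equal_dedup_workouts : Prop := ∀ (workouts : List (List (String × Option String))), Dom_dedup_workouts workouts → Spec_dedup_workouts workouts (dedup_workouts workouts)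

-- ===== LEMMAS AND PROOFS =====

-- the body of A's loop resp. B's loop, named for the proofs
def pvStepA (d : PySem.Dict (Option String) (List (String × Option String)))
    (w : List (String × Option String)) : PySem.Dict (Option String) (List (String × Option String)) :=
  let start := pvKey w
  if !(d.contains start) then
    d.insert start w
  else
    let existing := d.getD start []
    if pvHasDist w && !(pvHasDist existing) then d.insert start w else d

def pvStepB (d : PySem.Dict (Option String) (List (List (String × Option String))))
    (w : List (String × Option String)) : PySem.Dict (Option String) (List (List (String × Option String))) :=
  d.modify (pvKey w) [] (· ++ [w])

-- the groups of l with a given start key, and the first-seen key order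
def pvGrp (l : List (List (String × Option String))) (k : Option String) : List (List (String × Option String)) :=
  l.filter (fun w => pvKey w == k)

def pvKeys (l : List (List (String × Option String))) : List (Option String) :=
  PySem.Set.ofList (l.map pvKey)

lemma pvSet_snoc (xs : List (Option String)) (x : Option String) :
    PySem.Set.ofList (xs ++ [x]) = if (PySem.Set.ofList xs).contains x then PySem.Set.ofList xs else PySem.Set.ofList xs ++ [x] := by
  have h : PySem.Set.ofList (xs ++ [x]) = (PySem.Set.ofList xs).add x := by simp [PySem.Set.ofList]
  rw [h]; rfl

lemma pvGrp_append (l : List (List (String × Option String))) (w : List (String × Option String)) (k : Option String) :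
    pvGrp (l ++ [w]) k = pvGrp l k ++ (if pvKey w == k then [w] else []) := by
  simp only [pvGrp, List.filter_append]
  by_cases h : pvKey w = k <;> simp [h]

lemma pvGrp_ne_nil {l : List (List (String × Option String))} {k : Option String}
    (h : k ∈ l.map pvKey) : pvGrp l k ≠ [] := by
  simp only [List.mem_map] at h
  obtain ⟨w, hw, rfl⟩ := h
  have : w ∈ pvGrp l (pvKey w) := by simp [pvGrp, List.mem_filter, hw]
  intro hnil; rw [hnil] at this; exact absurd this (List.not_mem_nil)

lemma pvGrp_eq_nil {l : List (List (String × Option String))} {k : Option String}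
    (h : k ∉ l.map pvKey) : pvGrp l k = [] := by
  refine List.filter_eq_nil_iff.mpr (fun w hw => ?_)
  simp only [beq_iff_eq]
  intro hk; exact h (List.mem_map.mpr ⟨w, hw, hk⟩)

lemma pvPick_append {g : List (List (String × Option String))} (hg : g ≠ [])
    (w : List (String × Option String)) :
    pvPick (g ++ [w]) = if pvHasDist w && !(pvHasDist (pvPick g)) then w else pvPick g := by
  cases hf : g.find? pvHasDist with
  | some x =>
      have hx : pvHasDist x = true := List.find?_some hf
      simp [pvPick, List.find?_append, hf, hx]
  | none =>
      obtain ⟨a, t, rfl⟩ := List.exists_cons_of_ne_nil hg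
      have hda : pvHasDist a = false :=
        Bool.eq_false_iff.mpr (List.find?_eq_none.mp hf a (List.mem_cons_self))
      have hhead : pvPick (a :: t) = a := by simp [pvPick, hf, List.headD]
      have hft : List.find? pvHasDist t = none := by
        rwa [List.find?_cons_of_neg (by simp [hda])] at hf
      rw [hhead]
      cases hw : pvHasDist w <;>
        simp [pvPick, hda, hft, hw, List.headD, List.find?]

lemma pvKeys_append_mem {l : List (List (String × Option String))} {w : List (String × Option String)}
    (h : pvKey w ∈ l.map pvKey) : pvKeys (l ++ [w]) = pvKeys l := by
  have hc : (PySem.Set.ofList (l.map pvKey)).contains (pvKey w) = true := by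
    have := (PySem.Set.mem_ofList (l.map pvKey) (pvKey w)).mpr h
    simp only [PySem.Set.contains]; rw [List.contains_iff_mem]; exact this
  simp only [pvKeys, List.map_append, List.map_cons, List.map_nil]
  rw [pvSet_snoc, hc]; simp

lemma pvKeys_append_not_mem {l : List (List (String × Option String))} {w : List (String × Option String)}
    (h : pvKey w ∉ l.map pvKey) : pvKeys (l ++ [w]) = pvKeys l ++ [pvKey w] := by
  have hc : (PySem.Set.ofList (l.map pvKey)).contains (pvKey w) = false := by
    simp only [PySem.Set.contains]
    rw [Bool.eq_false_iff]
    intro hcm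
    rw [List.contains_iff_mem] at hcm
    exact h ((PySem.Set.mem_ofList _ _).mp hcm)
  simp only [pvKeys, List.map_append, List.map_cons, List.map_nil]
  rw [pvSet_snoc, hc]; simp

lemma pvKeys_nodup (l : List (List (String × Option String))) : (pvKeys l).Nodup :=
  PySem.Set.nodup_ofList _

lemma pvMem_keys_iff (l : List (List (String × Option String))) (k : Option String) :
    k ∈ pvKeys l ↔ k ∈ l.map pvKey := PySem.Set.mem_ofList _ _

-- B's dict after the grouping pass: keys in first-seen order, each mapped to its group
lemma pvB_items (l : List (List (String × Option String))) :
    (l.foldl pvStepB PySem.Dict.empty).items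
      = (pvKeys l).map (fun k => (k, pvGrp l k)) := by
  induction l using List.reverseRecOn with
  | nil => rfl
  | append_singleton l w ih =>
      rw [List.foldl_append]
      set d := l.foldl pvStepB PySem.Dict.empty with hd
      have hkeys : d.keys = pvKeys l := by
        simp only [PySem.Dict.keys, ih, List.map_map]
        simp [Function.comp_def]
      by_cases hm : pvKey w ∈ l.map pvKey
      · have hcont : d.contains (pvKey w) = true := by
          rw [PySem.Dict.contains_eq_decide_mem_keys, hkeys]
          simp [pvMem_keys_iff, hm]
        have hgetD : d.getD (pvKey w) [] = pvGrp l (pvKey w) := by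
          apply PySem.Dict.getD_of_mem_items
          · rw [ih]; exact List.mem_map.mpr ⟨pvKey w, (pvMem_keys_iff l _).mpr hm, rfl⟩
          · rw [hkeys]; exact pvKeys_nodup l
        show (d.insert (pvKey w) (d.getD (pvKey w) [] ++ [w])).items = _
        rw [PySem.Dict.items_insert_of_contains d _ hcont, ih, pvKeys_append_mem hm,
            List.map_map]
        apply List.map_congr_left
        intro k hk
        simp only [Function.comp]
        by_cases hkw : k = pvKey w
        · subst hkw; simp [pvGrp_append, hgetD]
        · have : (k == pvKey w) = false := by simp [hkw]
          simp [this, pvGrp_append, beq_iff_eq, Ne.symm hkw]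
      · have hcont : d.contains (pvKey w) = false := by
          rw [PySem.Dict.contains_eq_decide_mem_keys, hkeys]
          simp only [decide_eq_false_iff_not, pvMem_keys_iff]; exact hm
        have hgetD : d.getD (pvKey w) [] = [] := PySem.Dict.getD_of_not_contains d [] hcont
        show (d.insert (pvKey w) (d.getD (pvKey w) [] ++ [w])).items = _
        rw [PySem.Dict.items_insert_of_not_contains d _ hcont, ih,
            pvKeys_append_not_mem hm, hgetD, List.map_append]
        congr 1
        · apply List.map_congr_left
          intro k hk
          have hkw : k ≠ pvKey w := fun h => hm (h ▸ (pvMem_keys_iff l k).mp hk)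
          simp [pvGrp_append, beq_iff_eq, Ne.symm hkw]
        · simp [pvGrp_append, pvGrp_eq_nil hm]

-- A's dict after the streaming pass: same keys, each mapped to the pick of its group
lemma pvA_items (l : List (List (String × Option String))) :
    (l.foldl pvStepA PySem.Dict.empty).items
      = (pvKeys l).map (fun k => (k, pvPick (pvGrp l k))) := by
  induction l using List.reverseRecOn with
  | nil => rfl
  | append_singleton l w ih =>
      rw [List.foldl_append]
      set d := l.foldl pvStepA PySem.Dict.empty with hd
      have hkeys : d.keys = pvKeys l := by
        simp only [PySem.Dict.keys, ih, List.map_map]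
        simp [Function.comp_def]
      by_cases hm : pvKey w ∈ l.map pvKey
      · have hcont : d.contains (pvKey w) = true := by
          rw [PySem.Dict.contains_eq_decide_mem_keys, hkeys]
          simp [pvMem_keys_iff, hm]
        have hgetD : d.getD (pvKey w) [] = pvPick (pvGrp l (pvKey w)) := by
          apply PySem.Dict.getD_of_mem_items
          · rw [ih]; exact List.mem_map.mpr ⟨pvKey w, (pvMem_keys_iff l _).mpr hm, rfl⟩
          · rw [hkeys]; exact pvKeys_nodup l
        have hpick : pvPick (pvGrp (l ++ [w]) (pvKey w))
            = if pvHasDist w && !(pvHasDist (pvPick (pvGrp l (pvKey w)))) then w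
              else pvPick (pvGrp l (pvKey w)) := by
          rw [pvGrp_append]; simp only [beq_self_eq_true]
          exact pvPick_append (pvGrp_ne_nil hm) w
        show (pvStepA d w).items = _
        simp only [pvStepA, hcont, Bool.not_true, Bool.false_eq_true, if_false, hgetD]
        by_cases hc : (pvHasDist w && !(pvHasDist (pvPick (pvGrp l (pvKey w))))) = true
        · rw [if_pos hc, PySem.Dict.items_insert_of_contains d _ hcont, ih,
              pvKeys_append_mem hm, List.map_map]
          apply List.map_congr_left
          intro k hk
          simp only [Function.comp]
          by_cases hkw : k = pvKey w
          · subst hkw; simp only [beq_self_eq_true]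
            rw [hpick, if_pos hc]
            simp
          · have : (k == pvKey w) = false := by simp [hkw]
            simp only [this, Bool.false_eq_true, if_false]
            rw [pvGrp_append]
            simp [beq_iff_eq, Ne.symm hkw]
        · rw [if_neg hc, ih, pvKeys_append_mem hm]
          apply List.map_congr_left
          intro k hk
          by_cases hkw : k = pvKey w
          · subst hkw; rw [hpick, if_neg hc]
          · rw [pvGrp_append]; simp [beq_iff_eq, Ne.symm hkw]
      · have hcont : d.contains (pvKey w) = false := by
          rw [PySem.Dict.contains_eq_decide_mem_keys, hkeys]
          simp only [decide_eq_false_iff_not, pvMem_keys_iff]; exact hm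
        show (pvStepA d w).items = _
        simp only [pvStepA, hcont, Bool.not_false, if_true]
        rw [PySem.Dict.items_insert_of_not_contains d _ hcont, ih,
            pvKeys_append_not_mem hm, List.map_append]
        congr 1
        · apply List.map_congr_left
          intro k hk
          have hkw : k ≠ pvKey w := fun h => hm (h ▸ (pvMem_keys_iff l k).mp hk)
          rw [pvGrp_append]; simp [beq_iff_eq, Ne.symm hkw]
        · simp only [List.map_cons, List.map_nil]
          rw [pvGrp_append]
          simp only [pvGrp_eq_nil hm, pvPick, List.nil_append, beq_self_eq_true, if_true,
            List.find?]
          cases pvHasDist w <;> simp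

lemma dedup_workouts_eq_fold (workouts : List (List (String × Option String))) :
    dedup_workouts workouts = (workouts.foldl pvStepA PySem.Dict.empty).values := rfl

lemma dedup_workouts_alt_eq_fold (workouts : List (List (String × Option String))) :
    dedup_workouts_alt workouts
      = ((workouts.foldl pvStepB PySem.Dict.empty).values).map pvPick := rfl

-- ===== VERDICT (by name: the statement is the Claim_ definition above) =====
theorem dedup_workouts_spec : Claim_equal_dedup_workouts := by
  intro workouts _
  show dedup_workouts workouts = dedup_workouts_alt workouts
  rw [dedup_workouts_eq_fold, dedup_workouts_alt_eq_fold]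
  simp only [PySem.Dict.values, pvA_items, pvB_items, List.map_map]
  rfl
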